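-- pv_equiv track=rewrite | github.com/danafaiez/Entropy-of-Game-of-Life | entropy_game_of_life.py | number_edge
-- ===== SOURCE A (Python) =====
-- def number_edge(d):
--     count=0
--     #[number_edge(d[j]) for i in range(0,len(a)) for j in range(0,len(a)) if a[i][j]==1]
--     for i in range(0,len(d)):
--         for j in range(0,len(d)):
--             if d[i][j]==1:
--                 if j+1<len(d) and d[i][j+1]==0: count+=1
--                 if i+1<len(d) and d[i+1][j]==0: count+=1
--                 if i-1>=0 and d[i-1][j]==0: count+=1
--                 if j-1>=0 and d[i][j-1]==0: count+=1
--     return count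
-- ===== SOURCE B (Python) =====
-- def number_edge(d):
--     n = len(d)
--     count = 0
--     # horizontal adjacencies: (i,j)-(i,j+1)
--     for i in range(n):
--         for j in range(n - 1):
--             a, b = d[i][j], d[i][j + 1]
--             if (a == 1 and b == 0) or (a == 0 and b == 1):
--                 count += 1
--     # vertical adjacencies: (i,j)-(i+1,j)
--     for i in range(n - 1):
--         for j in range(n):
--             a, b = d[i][j], d[i + 1][j]
--             if (a == 1 and b == 0) or (a == 0 and b == 1):
--                 count += 1
--     return count
-- ===== Notes on version B (the rewrite author's own statement) =====
-- stated objective: alternative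
-- what changed: B counts each live-dead adjacency once by scanning the grid's horizontal and vertical edges, instead of tallying the four neighbours of every live cell as A does.
import Mathlib
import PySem

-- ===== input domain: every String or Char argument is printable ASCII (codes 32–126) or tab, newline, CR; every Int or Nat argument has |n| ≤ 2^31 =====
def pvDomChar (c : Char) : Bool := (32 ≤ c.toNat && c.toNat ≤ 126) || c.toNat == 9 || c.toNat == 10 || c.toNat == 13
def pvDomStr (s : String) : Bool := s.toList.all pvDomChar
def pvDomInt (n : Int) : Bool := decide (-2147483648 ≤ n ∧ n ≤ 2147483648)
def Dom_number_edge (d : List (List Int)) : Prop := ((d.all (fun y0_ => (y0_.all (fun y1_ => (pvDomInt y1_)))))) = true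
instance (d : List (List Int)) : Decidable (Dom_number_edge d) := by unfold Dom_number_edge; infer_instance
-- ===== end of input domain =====

-- B replaces A's per-live-cell neighbour tally by a single scan over the grid's
-- horizontal and vertical adjacencies, counting each live-dead edge once (alternative decomposition, same cost).


-- ===== PORT A =====
def number_edge (d : List (List Int)) : Int :=
  let n : Int := (d.length : Int)
  (PySem.List.pyRange 0 n).foldl (fun count i =>
    (PySem.List.pyRange 0 n).foldl (fun count j =>
      if PySem.List.pyGetD (PySem.List.pyGetD d i []) j 0 = 1 then
        let count := if j + 1 < n ∧ PySem.List.pyGetD (PySem.List.pyGetD d i []) (j + 1) 0 = 0 then count + 1 else count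
        let count := if i + 1 < n ∧ PySem.List.pyGetD (PySem.List.pyGetD d (i + 1) []) j 0 = 0 then count + 1 else count
        let count := if 0 ≤ i - 1 ∧ PySem.List.pyGetD (PySem.List.pyGetD d (i - 1) []) j 0 = 0 then count + 1 else count
        let count := if 0 ≤ j - 1 ∧ PySem.List.pyGetD (PySem.List.pyGetD d i []) (j - 1) 0 = 0 then count + 1 else count
        count
      else count) count) 0

-- ===== PORT B =====
def number_edge_alt (d : List (List Int)) : Int :=
  let n : Int := (d.length : Int)
  let count : Int :=
    (PySem.List.pyRange 0 n).foldl (fun count i =>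
      (PySem.List.pyRange 0 (n - 1)).foldl (fun count j =>
        let a := PySem.List.pyGetD (PySem.List.pyGetD d i []) j 0
        let b := PySem.List.pyGetD (PySem.List.pyGetD d i []) (j + 1) 0
        if (a = 1 ∧ b = 0) ∨ (a = 0 ∧ b = 1) then count + 1 else count) count) 0
  (PySem.List.pyRange 0 (n - 1)).foldl (fun count i =>
    (PySem.List.pyRange 0 n).foldl (fun count j =>
      let a := PySem.List.pyGetD (PySem.List.pyGetD d i []) j 0
      let b := PySem.List.pyGetD (PySem.List.pyGetD d (i + 1) []) j 0
      if (a = 1 ∧ b = 0) ∨ (a = 0 ∧ b = 1) then count + 1 else count) count) count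

-- ===== PRECONDITION & SPEC =====
-- Pre_ excludes exactly the grids on which Python A raises IndexError: some row
-- shorter than len(d), so that d[i][j] with j < len(d) goes out of range.
def Pre_number_edge (d : List (List Int)) : Prop := ∀ row ∈ d, d.length ≤ row.length
instance (d : List (List Int)) : Decidable (Pre_number_edge d) := by unfold Pre_number_edge; infer_instance
def pvWitness_number_edge : List (List Int) := [[1, 0], [0, 1]]
def Spec_number_edge (d : List (List Int)) (out : Int) : Prop := out = number_edge_alt d
instance (d : List (List Int)) (out : Int) : Decidable (Spec_number_edge d out) := by unfold Spec_number_edge; infer_instance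

-- ===== CLAIM (what is proved, stated in full; the proofs are below) =====
def Claim_equal_number_edge : Prop := ∀ (d : List (List Int)), Dom_number_edge d → Pre_number_edge d → Spec_number_edge d (number_edge d)

-- ===== LEMMAS AND PROOFS =====

def pvG (d : List (List Int)) (i j : Int) : Int :=
  PySem.List.pyGetD (PySem.List.pyGetD d i []) j 0

def pvFA (d : List (List Int)) (n i j : Int) : Int :=
  if pvG d i j = 1 then
    (if j + 1 < n ∧ pvG d i (j + 1) = 0 then (1:Int) else 0)
    + (if i + 1 < n ∧ pvG d (i + 1) j = 0 then 1 else 0)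
    + (if 0 ≤ i - 1 ∧ pvG d (i - 1) j = 0 then 1 else 0)
    + (if 0 ≤ j - 1 ∧ pvG d i (j - 1) = 0 then 1 else 0)
  else 0

def pvEH (d : List (List Int)) (i j : Int) : Int :=
  if (pvG d i j = 1 ∧ pvG d i (j + 1) = 0) ∨ (pvG d i j = 0 ∧ pvG d i (j + 1) = 1) then 1 else 0

def pvEV (d : List (List Int)) (i j : Int) : Int :=
  if (pvG d i j = 1 ∧ pvG d (i + 1) j = 0) ∨ (pvG d i j = 0 ∧ pvG d (i + 1) j = 1) then 1 else 0

lemma foldl_body {l : List Int} {c : Int} {body : Int → Int → Int} (f : Int → Int)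
    (h : ∀ c x, body c x = c + f x) : l.foldl body c = c + (l.map f).sum := by
  rw [show body = fun c x => c + f x from funext fun c => funext fun x => h c x]
  exact PySem.List.foldl_add l f c

lemma pyRange_pred (N : Nat) :
    PySem.List.pyRange 0 ((N:Int) - 1) = (List.range (N-1)).map (fun (k : Nat) => (k:Int)) := by
  cases N with
  | zero => decide
  | succ m =>
    rw [show ((m+1:Nat):Int) - 1 = (m:Int) by push_cast; ring]
    exact PySem.List.pyRange_zero_natCast m

lemma sum_guard_lt (n : Nat) (P : Nat → Prop) [DecidablePred P] :
    ∑ j ∈ Finset.range n, (if j+1 < n ∧ P j then (1:Int) else 0)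
    = ∑ j ∈ Finset.range (n-1), (if P j then (1:Int) else 0) := by
  cases n with
  | zero => simp
  | succ m =>
    rw [Finset.sum_range_succ, if_neg (by omega), add_zero]
    refine Finset.sum_congr rfl fun j hj => ?_
    rw [Finset.mem_range] at hj
    exact if_congr (and_iff_right (by omega)) rfl rfl

lemma sum_guard_ge (n : Nat) (P : Nat → Prop) [DecidablePred P] :
    ∑ j ∈ Finset.range n, (if 1 ≤ j ∧ P j then (1:Int) else 0)
    = ∑ j ∈ Finset.range (n-1), (if P (j+1) then (1:Int) else 0) := by
  cases n with
  | zero => simp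
  | succ m =>
    rw [Finset.sum_range_succ', if_neg (by omega), add_zero]
    refine Finset.sum_congr rfl fun j hj => ?_
    exact if_congr (and_iff_right (by omega)) rfl rfl

lemma pvFA_split (d : List (List Int)) (N i j : Nat) :
    pvFA d ↑N ↑i ↑j
    = (if j+1 < N ∧ (pvG d ↑i ↑j = 1 ∧ pvG d ↑i (↑j + 1) = 0) then (1:Int) else 0)
    + (if i+1 < N ∧ (pvG d ↑i ↑j = 1 ∧ pvG d (↑i + 1) ↑j = 0) then 1 else 0)
    + (if 1 ≤ i ∧ (pvG d ↑i ↑j = 1 ∧ pvG d (↑i - 1) ↑j = 0) then 1 else 0)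
    + (if 1 ≤ j ∧ (pvG d ↑i ↑j = 1 ∧ pvG d ↑i (↑j - 1) = 0) then 1 else 0) := by
  simp only [pvFA]
  split_ifs <;> omega

lemma pvEH_split (d : List (List Int)) (i j : Int) :
    pvEH d i j = (if pvG d i j = 1 ∧ pvG d i (j + 1) = 0 then (1:Int) else 0)
    + (if pvG d i j = 0 ∧ pvG d i (j + 1) = 1 then 1 else 0) := by
  simp only [pvEH]; split_ifs <;> omega

lemma pvEV_split (d : List (List Int)) (i j : Int) :
    pvEV d i j = (if pvG d i j = 1 ∧ pvG d (i + 1) j = 0 then (1:Int) else 0)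
    + (if pvG d i j = 0 ∧ pvG d (i + 1) j = 1 then 1 else 0) := by
  simp only [pvEV]; split_ifs <;> omega

lemma key (d : List (List Int)) (N : Nat) :
    ∑ i ∈ Finset.range N, ∑ j ∈ Finset.range N, pvFA d ↑N ↑i ↑j
    = (∑ i ∈ Finset.range N, ∑ j ∈ Finset.range (N-1), pvEH d ↑i ↑j)
    + ∑ i ∈ Finset.range (N-1), ∑ j ∈ Finset.range N, pvEV d ↑i ↑j := by
  -- split A's summand into the four neighbour indicators
  have hA : ∀ i ∈ Finset.range N, ∑ j ∈ Finset.range N, pvFA d ↑N ↑i ↑j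
      = (∑ j ∈ Finset.range N, (if j+1 < N ∧ (pvG d ↑i ↑j = 1 ∧ pvG d ↑i (↑j + 1) = 0) then (1:Int) else 0))
      + (∑ j ∈ Finset.range N, (if i+1 < N ∧ (pvG d ↑i ↑j = 1 ∧ pvG d (↑i + 1) ↑j = 0) then (1:Int) else 0))
      + (∑ j ∈ Finset.range N, (if 1 ≤ i ∧ (pvG d ↑i ↑j = 1 ∧ pvG d (↑i - 1) ↑j = 0) then (1:Int) else 0))
      + (∑ j ∈ Finset.range N, (if 1 ≤ j ∧ (pvG d ↑i ↑j = 1 ∧ pvG d ↑i (↑j - 1) = 0) then (1:Int) else 0)) := by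
    intro i _
    rw [← Finset.sum_add_distrib, ← Finset.sum_add_distrib, ← Finset.sum_add_distrib]
    exact Finset.sum_congr rfl fun j _ => pvFA_split d N i j
  rw [Finset.sum_congr rfl hA]
  rw [Finset.sum_add_distrib, Finset.sum_add_distrib, Finset.sum_add_distrib]
  -- right (horizontal, live on the left)
  have h1 : ∑ i ∈ Finset.range N, ∑ j ∈ Finset.range N,
      (if j+1 < N ∧ (pvG d ↑i ↑j = 1 ∧ pvG d ↑i (↑j + 1) = 0) then (1:Int) else 0)
      = ∑ i ∈ Finset.range N, ∑ j ∈ Finset.range (N-1),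
        (if pvG d ↑i ↑j = 1 ∧ pvG d ↑i (↑j + 1) = 0 then (1:Int) else 0) :=
    Finset.sum_congr rfl fun i _ => sum_guard_lt N _
  -- left (horizontal, live on the right)
  have h2 : ∑ i ∈ Finset.range N, ∑ j ∈ Finset.range N,
      (if 1 ≤ j ∧ (pvG d ↑i ↑j = 1 ∧ pvG d ↑i (↑j - 1) = 0) then (1:Int) else 0)
      = ∑ i ∈ Finset.range N, ∑ j ∈ Finset.range (N-1),
        (if pvG d ↑i ↑j = 0 ∧ pvG d ↑i (↑j + 1) = 1 then (1:Int) else 0) := by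
    refine Finset.sum_congr rfl fun i _ => ?_
    rw [sum_guard_ge N (fun j => pvG d ↑i ↑j = 1 ∧ pvG d ↑i (↑j - 1) = 0)]
    refine Finset.sum_congr rfl fun j _ => ?_
    rw [show ((j+1:Nat):Int) = (j:Int) + 1 by push_cast; ring,
        show ((j:Int) + 1 - 1) = (j:Int) by ring]
    exact if_congr and_comm rfl rfl
  -- down (vertical, live above)
  have h3 : ∑ i ∈ Finset.range N, ∑ j ∈ Finset.range N,
      (if i+1 < N ∧ (pvG d ↑i ↑j = 1 ∧ pvG d (↑i + 1) ↑j = 0) then (1:Int) else 0)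
      = ∑ i ∈ Finset.range (N-1), ∑ j ∈ Finset.range N,
        (if pvG d ↑i ↑j = 1 ∧ pvG d (↑i + 1) ↑j = 0 then (1:Int) else 0) := by
    rw [Finset.sum_comm]
    rw [Finset.sum_congr rfl fun j (_ : j ∈ Finset.range N) =>
      sum_guard_lt N (fun i => pvG d ↑i ↑j = 1 ∧ pvG d (↑i + 1) ↑j = 0)]
    apply Finset.sum_comm
  -- up (vertical, live below)
  have h4 : ∑ i ∈ Finset.range N, ∑ j ∈ Finset.range N,
      (if 1 ≤ i ∧ (pvG d ↑i ↑j = 1 ∧ pvG d (↑i - 1) ↑j = 0) then (1:Int) else 0)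
      = ∑ i ∈ Finset.range (N-1), ∑ j ∈ Finset.range N,
        (if pvG d ↑i ↑j = 0 ∧ pvG d (↑i + 1) ↑j = 1 then (1:Int) else 0) := by
    rw [Finset.sum_comm]
    rw [Finset.sum_congr rfl fun j (_ : j ∈ Finset.range N) =>
      sum_guard_ge N (fun i => pvG d ↑i ↑j = 1 ∧ pvG d (↑i - 1) ↑j = 0)]
    rw [Finset.sum_comm]
    refine Finset.sum_congr rfl fun i _ => Finset.sum_congr rfl fun j _ => ?_
    rw [show ((i+1:Nat):Int) = (i:Int) + 1 by push_cast; ring,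
        show ((i:Int) + 1 - 1) = (i:Int) by ring]
    exact if_congr and_comm rfl rfl
  rw [h1, h2, h3, h4]
  have hEH : ∀ i ∈ Finset.range N, ∑ j ∈ Finset.range (N-1), pvEH d ↑i ↑j
      = (∑ j ∈ Finset.range (N-1), (if pvG d ↑i ↑j = 1 ∧ pvG d ↑i (↑j + 1) = 0 then (1:Int) else 0))
      + (∑ j ∈ Finset.range (N-1), (if pvG d ↑i ↑j = 0 ∧ pvG d ↑i (↑j + 1) = 1 then (1:Int) else 0)) := by
    intro i _
    rw [← Finset.sum_add_distrib]
    exact Finset.sum_congr rfl fun j _ => pvEH_split d ↑i ↑j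
  have hEV : ∀ i ∈ Finset.range (N-1), ∑ j ∈ Finset.range N, pvEV d ↑i ↑j
      = (∑ j ∈ Finset.range N, (if pvG d ↑i ↑j = 1 ∧ pvG d (↑i + 1) ↑j = 0 then (1:Int) else 0))
      + (∑ j ∈ Finset.range N, (if pvG d ↑i ↑j = 0 ∧ pvG d (↑i + 1) ↑j = 1 then (1:Int) else 0)) := by
    intro i _
    rw [← Finset.sum_add_distrib]
    exact Finset.sum_congr rfl fun j _ => pvEV_split d ↑i ↑j
  rw [Finset.sum_congr rfl hEH, Finset.sum_congr rfl hEV,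
      Finset.sum_add_distrib, Finset.sum_add_distrib]
  ring

lemma A_eq_sum (d : List (List Int)) :
    number_edge d = ∑ i ∈ Finset.range d.length, ∑ j ∈ Finset.range d.length,
      pvFA d ↑d.length ↑i ↑j := by
  have h : number_edge d
      = 0 + ((PySem.List.pyRange 0 ↑d.length).map
          (fun i => ((PySem.List.pyRange 0 ↑d.length).map (fun j => pvFA d ↑d.length i j)).sum)).sum := by
    refine foldl_body _ fun c i => ?_
    refine foldl_body _ fun c j => ?_
    simp only [pvFA, pvG]
    split_ifs <;> omega
  rw [h, zero_add, PySem.List.pyRange_zero_natCast]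
  simp only [List.map_map]
  rfl

lemma B_eq_sum (d : List (List Int)) :
    number_edge_alt d
    = (∑ i ∈ Finset.range d.length, ∑ j ∈ Finset.range (d.length - 1), pvEH d ↑i ↑j)
    + ∑ i ∈ Finset.range (d.length - 1), ∑ j ∈ Finset.range d.length, pvEV d ↑i ↑j := by
  have hH : ∀ c : Int, (PySem.List.pyRange 0 (d.length : Int)).foldl (fun count i =>
      (PySem.List.pyRange 0 ((d.length : Int) - 1)).foldl (fun count j =>
        let a := PySem.List.pyGetD (PySem.List.pyGetD d i []) j 0
        let b := PySem.List.pyGetD (PySem.List.pyGetD d i []) (j + 1) 0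
        if (a = 1 ∧ b = 0) ∨ (a = 0 ∧ b = 1) then count + 1 else count) count) c
      = c + ((PySem.List.pyRange 0 (d.length : Int)).map
          (fun i => ((PySem.List.pyRange 0 ((d.length : Int) - 1)).map (fun j => pvEH d i j)).sum)).sum := by
    intro c
    refine foldl_body _ fun c i => ?_
    refine foldl_body _ fun c j => ?_
    simp only [pvEH, pvG]
    split_ifs <;> omega
  have hV : ∀ c : Int, (PySem.List.pyRange 0 ((d.length : Int) - 1)).foldl (fun count i =>
      (PySem.List.pyRange 0 (d.length : Int)).foldl (fun count j =>
        let a := PySem.List.pyGetD (PySem.List.pyGetD d i []) j 0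
        let b := PySem.List.pyGetD (PySem.List.pyGetD d (i + 1) []) j 0
        if (a = 1 ∧ b = 0) ∨ (a = 0 ∧ b = 1) then count + 1 else count) count) c
      = c + ((PySem.List.pyRange 0 ((d.length : Int) - 1)).map
          (fun i => ((PySem.List.pyRange 0 (d.length : Int)).map (fun j => pvEV d i j)).sum)).sum := by
    intro c
    refine foldl_body _ fun c i => ?_
    refine foldl_body _ fun c j => ?_
    simp only [pvEV, pvG]
    split_ifs <;> omega
  show (PySem.List.pyRange 0 ((d.length : Int) - 1)).foldl _
      ((PySem.List.pyRange 0 (d.length : Int)).foldl _ 0) = _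
  rw [hV, hH, zero_add, PySem.List.pyRange_zero_natCast, pyRange_pred]
  simp only [List.map_map]
  rfl

-- ===== VERDICT (by name: the statement is the Claim_ definition above) =====
theorem number_edge_spec : Claim_equal_number_edge := by
  intro d _ _
  show number_edge d = number_edge_alt d
  rw [A_eq_sum, B_eq_sum]
  exact key d d.length
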